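-- pv_equiv track=rewrite | github.com/lohiya-saurabh/DSA | DSA-1/Math/factorialArray.py | solve
-- ===== SOURCE A (Python) =====
-- import math
--
-- def solve(A):
--     freqs = {}
--     totalPrimesTillA = findAllPrimes(max(A))
--     totalPrimeFactorsMap = []
--     for ele in A:
--         if ele <= 1:
--             totalPrimeFactorsMap.append(0)
--         else:
--             totalPrimeFactorsMap.append(totalPrimesTillA[ele - 1])
--     for i in totalPrimeFactorsMap:
--         if i in freqs:
--             freqs[i] += 1
--         else:
--             freqs[i] = 1
--     totalSubsequences = 0
--     for key in freqs:
--         if key == 0: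
--             continue
--         totalSubsequences += 2**freqs[key] - 1
--     return totalSubsequences % (10**9 + 7)
--
-- def findAllPrimes(A):
--     sqrt_A = math.sqrt(A)
--     isPrime = [True for ele in range(A)]
--     isPrime[0] = False
--     for i in range(2, int(sqrt_A) + 1):
--         for j in range(2*i, A + 1, i):
--             isPrime[j - 1] = False
--     total = 0
--     totalPrimes = []
--     for val in isPrime:
--         total += 1 if val else 0
--         totalPrimes.append(total)
--     return totalPrimes
-- ===== SOURCE B (Python) =====
-- import math
--
--
-- def _count_le(primes, x):
--     # number of primes <= x, by binary search on the ascending list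
--     lo, hi = 0, len(primes)
--     while lo < hi:
--         mid = (lo + hi) // 2
--         if primes[mid] <= x:
--             lo = mid + 1
--         else:
--             hi = mid
--     return lo
--
--
-- def solve(A):
--     m = max(A)
--     # Eratosthenes over 0..m, direct indexing, marking from i*i
--     is_prime = [True] * (m + 1)
--     is_prime[0] = False
--     is_prime[1] = False
--     for i in range(2, int(math.sqrt(m)) + 1):
--         for j in range(i * i, m + 1, i):
--             is_prime[j] = False
--     primes = [p for p in range(2, m + 1) if is_prime[p]]
--     freq = {}
--     for x in A:
--         v = _count_le(primes, x)
--         freq[v] = freq.get(v, 0) + 1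
--     total = sum(2 ** c - 1 for k, c in freq.items() if k != 0)
--     return total % (10 ** 9 + 7)
-- ===== Notes on version B (the rewrite author's own statement) =====
-- stated objective: alternative
-- what changed: B sieves 0..max directly (marking from i*i) and keeps an explicit ascending primes list, computes each element's prime-count by binary search into that list instead of A's shifted prefix-count array, and tallies the counts in one pass with dict.get instead of A's membership-tested frequency dict over a separately built list.
-- outside the precondition, e.g. on solve([]): A raises ValueError, B raises ValueError
import Mathlib
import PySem

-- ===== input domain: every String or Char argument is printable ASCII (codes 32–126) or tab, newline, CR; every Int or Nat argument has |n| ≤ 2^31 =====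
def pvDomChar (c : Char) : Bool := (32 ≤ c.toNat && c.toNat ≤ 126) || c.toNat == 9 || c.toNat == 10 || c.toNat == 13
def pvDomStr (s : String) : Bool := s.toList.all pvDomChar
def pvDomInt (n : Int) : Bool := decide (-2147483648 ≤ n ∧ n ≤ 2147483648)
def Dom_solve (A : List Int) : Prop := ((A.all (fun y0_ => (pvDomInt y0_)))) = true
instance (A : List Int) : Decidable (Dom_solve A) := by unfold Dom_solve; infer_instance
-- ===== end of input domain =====

-- B: sieves 0..max directly (marking from i*i), keeps an explicit primes list, binary-searches
-- it per element and tallies with dedup+count, instead of A's shifted sieve, prefix-count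
-- array and hand-kept frequency dict; same results, proved equal on Pre_solve.


-- ===== PORT A =====
-- int(math.sqrt(A)) is ported as Nat.sqrt, exact for the admitted 1 ≤ A ≤ 2^31
-- Python lists are arrays: ported with Array (set/push in place); indices are in range on
-- every access these loops make, so setIfInBounds is exact
def findAllPrimes (A : Int) : List Int :=
  let n := A.toNat
  let isPrime0 := (Array.replicate n true).setIfInBounds 0 false  -- isPrime[0] = False (index 0 exists on admitted inputs)
  let isPrime := (PySem.List.pyRange 2 ((Nat.sqrt n : Int) + 1) 1).foldl
    (fun ip i => (PySem.List.pyRange (2 * i) (A + 1) i).foldl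
      (fun ip j => ip.setIfInBounds (j - 1).toNat false) ip) isPrime0  -- isPrime[j-1] = False (j - 1 ≥ 3 here)
  ((isPrime.foldl
    (fun (acc : Int × Array Int) val =>
      let total := acc.1 + (if val then 1 else 0)
      (total, acc.2.push total)) ((0 : Int), (#[] : Array Int))).2).toList

def solve (A : List Int) : Int :=
  let totalPrimesTillA := findAllPrimes ((PySem.List.max? A id).getD 0)  -- max(A): raises on [], excluded by Pre_solve
  let totalPrimeFactorsMap := A.foldl
    (fun acc ele => acc ++ [if ele ≤ 1 then (0 : Int)
      else PySem.List.pyGetD totalPrimesTillA (ele - 1) 0]) []           -- 1 ≤ ele-1 < len on admitted inputs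
  let freqs := totalPrimeFactorsMap.foldl
    (fun (d : PySem.Dict Int Int) i =>
      if d.contains i then d.modify i 0 (· + 1) else d.insert i 1) PySem.Dict.empty
  let totalSubsequences := freqs.items.foldl
    (fun acc kv => if kv.1 = 0 then acc else acc + 2 ^ kv.2.toNat - 1) (0 : Int)  -- stored counts are ≥ 1
  PySem.Int.mod totalSubsequences (10 ^ 9 + 7)

-- ===== PORT B =====
-- the while-loop of _count_le; terminates since the bracket [lo, hi) shrinks
def countLE (primes : List Int) (x : Int) (lo hi : Int) : Int :=
  if h : lo < hi then
    let mid := PySem.Int.floordiv (lo + hi) 2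
    if PySem.List.pyGetD primes mid 0 ≤ x then countLE primes x (mid + 1) hi  -- primes[mid] in range on every call made
    else countLE primes x lo mid
  else lo
termination_by (hi - lo).toNat
decreasing_by
  · have : PySem.Int.floordiv (lo + hi) 2 < hi := by
      rw [PySem.Int.floordiv_lt_iff_lt_mul (by omega)]; omega
    have hb := PySem.Int.floordiv_two_mid_bounds (le_of_lt h)
    omega
  · have : PySem.Int.floordiv (lo + hi) 2 < hi := by
      rw [PySem.Int.floordiv_lt_iff_lt_mul (by omega)]; omega
    have hb := PySem.Int.floordiv_two_mid_bounds (le_of_lt h)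
    omega

def solve_alt (A : List Int) : Int :=
  let m := (PySem.List.max? A id).getD 0                    -- max(A): raises on [], excluded by Pre_solve
  let isPrime0 := ((Array.replicate (m + 1).toNat true).setIfInBounds 0 false).setIfInBounds 1 false
  let isPrime := (PySem.List.pyRange 2 ((Nat.sqrt m.toNat : Int) + 1) 1).foldl
    (fun ip i => (PySem.List.pyRange (i * i) (m + 1) i).foldl
      (fun ip j => ip.setIfInBounds j.toNat false) ip) isPrime0
  let primes := (PySem.List.pyRange 2 (m + 1) 1).filter
    (fun p => isPrime.getD p.toNat false)                   -- is_prime[p]: 0 ≤ p ≤ m, in range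
  let pis := A.map (fun x => countLE primes x 0 primes.length)
  let freq := pis.foldl (fun (d : PySem.Dict Int Int) v => d.insert v (d.getD v 0 + 1))
    PySem.Dict.empty
  let total := ((freq.items.filter (fun kv => !(kv.1 == 0))).map
    (fun kv => (2 : Int) ^ kv.2.toNat - 1)).sum            -- tallies are ≥ 1
  PySem.Int.mod total (10 ^ 9 + 7)

-- ===== PRECONDITION & SPEC =====
-- Pre_ excludes exactly the inputs on which A raises: max([]) is a ValueError, and with
-- max(A) ≤ 0 findAllPrimes raises (math.sqrt of a negative, or isPrime[0] on an empty list).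
def Pre_solve (A : List Int) : Prop := A ≠ [] ∧ ∃ x ∈ A, 1 ≤ x
instance (A : List Int) : Decidable (Pre_solve A) := by unfold Pre_solve; infer_instance
def pvWitness_solve : List Int := [3, 1, 2]

def Spec_solve (A : List Int) (out : Int) : Prop := out = solve_alt A
instance (A : List Int) (out : Int) : Decidable (Spec_solve A out) := by unfold Spec_solve; infer_instance

-- ===== CLAIM (what is proved, stated in full; the proofs are below) =====
def Claim_equal_solve : Prop := ∀ (A : List Int), Dom_solve A → Pre_solve A → Spec_solve A (solve A)

-- ===== LEMMAS AND PROOFS =====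

lemma mark1_length (L : List Int) (g : Int → Nat) (ip : List Bool) :
    (L.foldl (fun ip j => ip.set (g j) false) ip).length = ip.length := by
  induction L generalizing ip with
  | nil => rfl
  | cons j L ih => simp [List.foldl_cons, ih, List.length_set]

lemma mark2_length (O : List Int) (inner : Int → List Int) (g : Int → Nat) (ip : List Bool) :
    (O.foldl (fun ip i => (inner i).foldl (fun ip j => ip.set (g j) false) ip) ip).length
      = ip.length := by
  induction O generalizing ip with
  | nil => rfl
  | cons i O ih => simp [List.foldl_cons, ih, mark1_length]

lemma getD_set_bool (l : List Bool) (i t : Nat) (a d : Bool) :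
    (l.set i a).getD t d = if i = t ∧ i < l.length then a else l.getD t d := by
  simp only [List.getD, List.getElem?_set]
  split_ifs with h1 h2 h3 h3 <;> first | (exfalso; omega) | simp_all

lemma mark1_getD (L : List Int) (g : Int → Nat) (ip : List Bool) (t : Nat) (ht : t < ip.length) :
    (L.foldl (fun ip j => ip.set (g j) false) ip).getD t false
      = (ip.getD t false && !decide (∃ j ∈ L, g j = t)) := by
  induction L generalizing ip with
  | nil => simp
  | cons j L ih =>
    rw [List.foldl_cons, ih _ (by simpa using ht), getD_set_bool]
    by_cases hgt : g j = t
    · simp [hgt, ht]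
    · simp [hgt]

lemma mark2_getD (O : List Int) (inner : Int → List Int) (g : Int → Nat) (ip : List Bool)
    (t : Nat) (ht : t < ip.length) :
    (O.foldl (fun ip i => (inner i).foldl (fun ip j => ip.set (g j) false) ip) ip).getD t false
      = (ip.getD t false && !decide (∃ i ∈ O, ∃ j ∈ inner i, g j = t)) := by
  induction O generalizing ip with
  | nil => simp
  | cons i O ih =>
    rw [List.foldl_cons, ih _ (by simpa [mark1_length] using ht), mark1_getD _ _ _ _ ht]
    by_cases h : ∃ j ∈ inner i, g j = t <;> simp [h]

def sdiv (s k : Int) : Prop := ∃ i : Int, 2 ≤ i ∧ i ≤ s ∧ i ∣ k ∧ i * i ≤ k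

lemma form_equiv (m k : Int) (hk : 2 ≤ k) (hkm : k ≤ m) :
    (∃ i : Int, 2 ≤ i ∧ i ≤ (Nat.sqrt m.toNat : Int) ∧ i ∣ k ∧ 2 * i ≤ k) ↔
    sdiv (Nat.sqrt m.toNat) k := by
  constructor
  · rintro ⟨i, h2i, his, hdvd, h2ik⟩
    by_cases hii : i * i ≤ k
    · exact ⟨i, h2i, his, hdvd, hii⟩
    · push Not at hii
      obtain ⟨c, hc⟩ := hdvd
      have hc2 : 2 ≤ c := by nlinarith
      have hcc : c * c < k := by nlinarith
      have hcs : c ≤ (Nat.sqrt m.toNat : Int) := by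
        have h1 : c.toNat * c.toNat ≤ m.toNat := by
          have : ((c.toNat * c.toNat : Nat) : Int) ≤ ((m.toNat : Nat) : Int) := by
            push_cast [Int.toNat_of_nonneg (by omega : (0:Int) ≤ c),
              Int.toNat_of_nonneg (by omega : (0:Int) ≤ m)]
            nlinarith
          exact_mod_cast this
        have := Nat.le_sqrt.mpr h1
        omega
      exact ⟨c, hc2, hcs, ⟨i, by linarith [hc, mul_comm i c]⟩, le_of_lt hcc⟩
  · rintro ⟨i, h2i, his, hdvd, hii⟩
    exact ⟨i, h2i, his, hdvd, by nlinarith⟩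

def sieveA (m : Int) : List Bool :=
  (PySem.List.pyRange 2 ((Nat.sqrt m.toNat : Int) + 1) 1).foldl
    (fun ip i => (PySem.List.pyRange (2 * i) (m + 1) i).foldl
      (fun ip j => ip.set (j - 1).toNat false) ip)
    ((List.replicate m.toNat true).set 0 false)

def sieveB (m : Int) : List Bool :=
  (PySem.List.pyRange 2 ((Nat.sqrt m.toNat : Int) + 1) 1).foldl
    (fun ip i => (PySem.List.pyRange (i * i) (m + 1) i).foldl
      (fun ip j => ip.set j.toNat false) ip)
    (((List.replicate (m + 1).toNat true).set 0 false).set 1 false)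

-- array forms of the two sieves (as the ports compute them) and bridges to the list forms
def sieveAArr (m : Int) : Array Bool :=
  (PySem.List.pyRange 2 ((Nat.sqrt m.toNat : Int) + 1) 1).foldl
    (fun ip i => (PySem.List.pyRange (2 * i) (m + 1) i).foldl
      (fun ip j => ip.setIfInBounds (j - 1).toNat false) ip)
    ((Array.replicate m.toNat true).setIfInBounds 0 false)

def sieveBArr (m : Int) : Array Bool :=
  (PySem.List.pyRange 2 ((Nat.sqrt m.toNat : Int) + 1) 1).foldl
    (fun ip i => (PySem.List.pyRange (i * i) (m + 1) i).foldl
      (fun ip j => ip.setIfInBounds j.toNat false) ip)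
    (((Array.replicate (m + 1).toNat true).setIfInBounds 0 false).setIfInBounds 1 false)

def primesB (m : Int) : List Int :=
  (PySem.List.pyRange 2 (m + 1) 1).filter (fun p => (sieveBArr m).getD p.toNat false)

lemma arrGetD_toList (a : Array Bool) (n : Nat) (d : Bool) : a.getD n d = a.toList.getD n d := by
  unfold Array.getD List.getD
  split
  · rename_i h
    rw [List.getElem?_eq_getElem (by simpa using h)]
    simp [Array.getElem_toList]
  · rename_i h
    rw [List.getElem?_eq_none (by simpa using h)]
    rfl

lemma toList_markfold1 (L : List Int) (g : Int → Nat) (a : Array Bool) :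
    (L.foldl (fun ip j => ip.setIfInBounds (g j) false) a).toList
      = L.foldl (fun ip j => ip.set (g j) false) a.toList := by
  induction L generalizing a with
  | nil => rfl
  | cons j L ih => rw [List.foldl_cons, List.foldl_cons, ih, Array.toList_setIfInBounds]

lemma toList_markfold2 (O : List Int) (inner : Int → List Int) (g : Int → Nat) (a : Array Bool) :
    (O.foldl (fun ip i => (inner i).foldl (fun ip j => ip.setIfInBounds (g j) false) ip) a).toList
      = O.foldl (fun ip i => (inner i).foldl (fun ip j => ip.set (g j) false) ip) a.toList := by
  induction O generalizing a with
  | nil => rfl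
  | cons i O ih => rw [List.foldl_cons, List.foldl_cons, ih, toList_markfold1]

lemma sieveAArr_toList (m : Int) : (sieveAArr m).toList = sieveA m := by
  unfold sieveAArr sieveA
  rw [toList_markfold2, Array.toList_setIfInBounds, Array.toList_replicate]

lemma sieveBArr_toList (m : Int) : (sieveBArr m).toList = sieveB m := by
  unfold sieveBArr sieveB
  rw [toList_markfold2, Array.toList_setIfInBounds, Array.toList_setIfInBounds,
    Array.toList_replicate]


lemma sieveA_length (m : Int) : (sieveA m).length = m.toNat := by
  unfold sieveA; rw [mark2_length]; simp

lemma markA_iff (m k : Int) (h2 : 2 ≤ k) (hkm : k ≤ m) :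
    (∃ i ∈ PySem.List.pyRange 2 ((Nat.sqrt m.toNat : Int) + 1) 1,
      ∃ j ∈ PySem.List.pyRange (2 * i) (m + 1) i, (j - 1).toNat = (k - 1).toNat)
    ↔ sdiv (Nat.sqrt m.toNat) k := by
  rw [← form_equiv m k h2 hkm]
  constructor
  · rintro ⟨i, hi, j, hj, hjk⟩
    rw [PySem.List.mem_pyRange_iff_of_pos (by norm_num)] at hi
    obtain ⟨h2i, his, -⟩ := hi
    rw [PySem.List.mem_pyRange_iff_of_pos (by omega)] at hj
    obtain ⟨h2ij, hjm, hdvd⟩ := hj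
    have hjk' : j = k := by omega
    subst hjk'
    refine ⟨i, h2i, by omega, ?_, h2ij⟩
    have := hdvd.add (dvd_mul_left i 2)
    simpa using this
  · rintro ⟨i, h2i, his, hdvd, h2ik⟩
    refine ⟨i, ?_, k, ?_, rfl⟩
    · rw [PySem.List.mem_pyRange_iff_of_pos (by norm_num)]
      exact ⟨h2i, by omega, one_dvd _⟩
    · rw [PySem.List.mem_pyRange_iff_of_pos (by omega)]
      exact ⟨h2ik, by omega, hdvd.sub (dvd_mul_left i 2)⟩

lemma markB_iff (m k : Int) (h2 : 2 ≤ k) (hkm : k ≤ m) :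
    (∃ i ∈ PySem.List.pyRange 2 ((Nat.sqrt m.toNat : Int) + 1) 1,
      ∃ j ∈ PySem.List.pyRange (i * i) (m + 1) i, j.toNat = k.toNat)
    ↔ sdiv (Nat.sqrt m.toNat) k := by
  constructor
  · rintro ⟨i, hi, j, hj, hjk⟩
    rw [PySem.List.mem_pyRange_iff_of_pos (by norm_num)] at hi
    obtain ⟨h2i, his, -⟩ := hi
    rw [PySem.List.mem_pyRange_iff_of_pos (by omega)] at hj
    obtain ⟨hiij, hjm, hdvd⟩ := hj
    have hii4 : 4 ≤ i * i := by nlinarith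
    have hjk' : j = k := by omega
    subst hjk'
    refine ⟨i, h2i, by omega, ?_, hiij⟩
    have := hdvd.add (dvd_mul_right i i)
    simpa using this
  · rintro ⟨i, h2i, his, hdvd, hii⟩
    refine ⟨i, ?_, k, ?_, rfl⟩
    · rw [PySem.List.mem_pyRange_iff_of_pos (by norm_num)]
      exact ⟨h2i, by omega, one_dvd _⟩
    · rw [PySem.List.mem_pyRange_iff_of_pos (by omega)]
      exact ⟨hii, by omega, hdvd.sub (dvd_mul_right i i)⟩

lemma sieveA_getD (m k : Int) (h2 : 2 ≤ k) (hkm : k ≤ m) :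
    ((sieveA m).getD (k - 1).toNat false = true) ↔ ¬ sdiv (Nat.sqrt m.toNat) k := by
  unfold sieveA
  rw [mark2_getD _ _ _ _ _ (by simp [List.length_set, List.length_replicate]; omega)]
  rw [getD_set_bool]
  rw [if_neg (by rintro ⟨h, -⟩; omega)]
  have hrep : (List.replicate m.toNat true).getD (k - 1).toNat false = true := by
    simp [List.getD, List.getElem?_replicate]
    rw [if_pos (by omega)]; rfl
  rw [hrep]
  rw [Bool.true_and, ← markA_iff m k h2 hkm]
  simp

lemma sieveA_getD_zero (m : Int) (hm : 1 ≤ m) : (sieveA m).getD 0 false = false := by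
  unfold sieveA
  rw [mark2_getD _ _ _ _ _ (by simp [List.length_set, List.length_replicate]; omega)]
  rw [getD_set_bool, if_pos (by simp; omega)]
  simp

lemma sieveB_getD (m k : Int) (h2 : 2 ≤ k) (hkm : k ≤ m) :
    ((sieveB m).getD k.toNat false = true) ↔ ¬ sdiv (Nat.sqrt m.toNat) k := by
  unfold sieveB
  rw [mark2_getD _ _ _ _ _ (by simp [List.length_set, List.length_replicate]; omega)]
  rw [getD_set_bool, if_neg (by rintro ⟨h, -⟩; omega)]
  rw [getD_set_bool, if_neg (by rintro ⟨h, -⟩; omega)]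
  have hrep : (List.replicate (m + 1).toNat true).getD k.toNat false = true := by
    simp [List.getD, List.getElem?_replicate]
    rw [if_pos (by omega)]; rfl
  rw [hrep, Bool.true_and]
  rw [← markB_iff m k h2 hkm]
  simp

lemma countP_boundary (l : List Int) (p : Int → Bool) (r : Nat) (hr : r ≤ l.length)
    (h1 : ∀ (t : Nat) (ht : t < l.length), t < r → p l[t] = true)
    (h2 : ∀ (t : Nat) (ht : t < l.length), r ≤ t → p l[t] = false) :
    l.countP p = r := by
  have htake : (l.take r).countP p = r := by
    rw [List.countP_eq_length.mpr, List.length_take]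
    · omega
    · intro a ha
      rw [List.mem_iff_getElem] at ha
      obtain ⟨i, hi, rfl⟩ := ha
      rw [List.getElem_take]
      exact h1 i (by simp at hi; omega) (by simp at hi; omega)
  have hdrop : (l.drop r).countP p = 0 := by
    rw [List.countP_eq_zero]
    intro a ha
    rw [List.mem_iff_getElem] at ha
    obtain ⟨i, hi, rfl⟩ := ha
    rw [List.getElem_drop]
    simp only [List.length_drop] at hi
    rw [h2 (r + i) (by omega) (by omega)]
    simp
  calc l.countP p = (l.take r ++ l.drop r).countP p := by rw [List.take_append_drop]
    _ = r := by rw [List.countP_append, htake, hdrop]; omega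

lemma countLE_done (primes : List Int) (x lo hi : Int) (h0 : 0 ≤ lo) (hlh : lo ≤ hi)
    (hhl : hi ≤ (primes.length : Int)) (hnlt : ¬ lo < hi)
    (h1 : ∀ (t : Nat) (ht : t < primes.length), t < lo.toNat → primes[t] ≤ x)
    (h2 : ∀ (t : Nat) (ht : t < primes.length), hi.toNat ≤ t → ¬ primes[t] ≤ x) :
    countLE primes x lo hi = (primes.countP (fun p => decide (p ≤ x)) : Int) := by
  rw [countLE, dif_neg hnlt]
  have heq : lo = hi := by omega
  subst heq
  rw [countP_boundary primes _ lo.toNat (by omega)]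
  · omega
  · intro t ht hlt
    simpa using h1 t ht hlt
  · intro t ht hge
    simpa using h2 t ht hge

lemma countLE_go (primes : List Int) (x : Int) (hs : List.Pairwise (· < ·) primes) :
    ∀ (n : Nat) (lo hi : Int), (hi - lo).toNat ≤ n → 0 ≤ lo → lo ≤ hi →
    hi ≤ (primes.length : Int) →
    (∀ (t : Nat) (ht : t < primes.length), t < lo.toNat → primes[t] ≤ x) →
    (∀ (t : Nat) (ht : t < primes.length), hi.toNat ≤ t → ¬ primes[t] ≤ x) →
    countLE primes x lo hi = (primes.countP (fun p => decide (p ≤ x)) : Int) := by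
  intro n
  induction n with
  | zero =>
    intro lo hi hn h0 hlh hhl h1 h2
    exact countLE_done primes x lo hi h0 hlh hhl (by omega) h1 h2
  | succ n ih =>
    intro lo hi hn h0 hlh hhl h1 h2
    by_cases hlt : lo < hi
    · rw [countLE, dif_pos hlt]
      have hb := PySem.Int.floordiv_two_mid_bounds hlh
      have hmidlt : PySem.Int.floordiv (lo + hi) 2 < hi := by
        rw [PySem.Int.floordiv_lt_iff_lt_mul (by omega)]; omega
      set mid := PySem.Int.floordiv (lo + hi) 2 with hmid
      have hmid0 : 0 ≤ mid := by omega
      have hmidlen : mid.toNat < primes.length := by omega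
      have hget : PySem.List.pyGetD primes mid 0 = primes[mid.toNat] := by
        rw [PySem.List.pyGetD_of_nonneg _ _ hmid0, List.getD_eq_getElem]
      show (if PySem.List.pyGetD primes mid 0 ≤ x then countLE primes x (mid + 1) hi
        else countLE primes x lo mid) = (primes.countP (fun p => decide (p ≤ x)) : Int)
      rw [hget]
      have hpw := List.pairwise_iff_getElem.mp hs
      by_cases hcmp : primes[mid.toNat] ≤ x
      · rw [if_pos hcmp]
        apply ih (mid + 1) hi (by omega) (by omega) (by omega) hhl
        · intro t ht htlt
          rcases Nat.lt_or_ge t mid.toNat with h | h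
          · exact le_of_lt (lt_of_lt_of_le (hpw t mid.toNat ht hmidlen h) hcmp)
          · have : t = mid.toNat := by omega
            subst this; exact hcmp
        · exact h2
      · rw [if_neg hcmp]
        apply ih lo mid (by omega) h0 (by omega) (by omega) h1
        intro t ht htge
        rcases Nat.lt_or_ge mid.toNat t with h | h
        · intro hle
          exact hcmp (le_trans (le_of_lt (hpw mid.toNat t hmidlen ht h)) hle)
        · have : t = mid.toNat := by omega
          subst this; exact hcmp
    · exact countLE_done primes x lo hi h0 hlh hhl hlt h1 h2

lemma countLE_spec (primes : List Int) (x : Int) (hs : List.Pairwise (· < ·) primes) :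
    countLE primes x 0 primes.length = (primes.countP (fun p => decide (p ≤ x)) : Int) := by
  apply countLE_go primes x hs primes.length 0 primes.length (by omega) (by omega)
    (by omega) (by omega)
  · intro t ht htlt
    exact absurd htlt (by omega)
  · intro t ht htge
    exact absurd ht (by omega)

lemma primesB_mem (m p : Int) :
    p ∈ primesB m ↔ (2 ≤ p ∧ p ≤ m ∧ ¬ sdiv (Nat.sqrt m.toNat) p) := by
  unfold primesB
  rw [List.mem_filter, PySem.List.mem_pyRange_iff_of_pos (by norm_num)]
  constructor
  · rintro ⟨⟨h2, hm, -⟩, hval⟩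
    rw [arrGetD_toList, sieveBArr_toList] at hval
    exact ⟨h2, by omega, (sieveB_getD m p h2 (by omega)).mp hval⟩
  · rintro ⟨h2, hm, hnd⟩
    refine ⟨⟨h2, by omega, one_dvd _⟩, ?_⟩
    rw [arrGetD_toList, sieveBArr_toList]
    exact (sieveB_getD m p h2 hm).mpr hnd

lemma primesB_sorted (m : Int) : List.Pairwise (· < ·) (primesB m) := by
  unfold primesB
  apply List.Pairwise.filter
  rw [PySem.List.pyRange_of_pos _ _ (by norm_num)]
  apply List.Pairwise.map
  · intro a b (h : a < b)
    show (2 : Int) + 1 * a < 2 + 1 * b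
    omega
  · exact List.pairwise_lt_range

lemma prefix_snd (bs : List Bool) : ∀ (t0 : Int) (pre : List Int),
    (bs.foldl (fun acc val =>
      let total := acc.1 + (if val then 1 else 0)
      (total, acc.2 ++ [total])) (t0, pre)).2
    = pre ++ (List.range bs.length).map (fun t => t0 + ((bs.take (t + 1)).countP id : Int)) := by
  induction bs with
  | nil => simp
  | cons b bs ih =>
    intro t0 pre
    rw [List.foldl_cons]
    show (bs.foldl _ (t0 + (if b then 1 else 0), pre ++ [t0 + (if b then 1 else 0)])).2 = _
    rw [ih]
    rw [List.length_cons, List.range_succ_eq_map, List.map_cons, List.map_map,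
      List.append_assoc, List.singleton_append]
    congr 1
    congr 1
    · cases b <;> simp [List.take_succ_cons, List.countP_cons]
    · apply List.map_congr_left
      intro t ht
      simp only [Function.comp_apply, List.take_succ_cons, List.countP_cons, id_eq,
        Nat.succ_eq_add_one]
      cases b <;> simp <;> push_cast <;> omega
lemma countP_id_eq_range (l : List Bool) :
    l.countP id = (List.range l.length).countP (fun t => l.getD t false) := by
  induction l with
  | nil => simp
  | cons b l ih =>
    rw [List.countP_cons, List.length_cons, List.range_succ_eq_map, List.countP_cons,
      List.countP_map, ih]
    have : ((fun t => (b :: l).getD t false) ∘ Nat.succ) = (fun t => l.getD t false) := by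
      funext t; rfl
    rw [this]
    simp [List.getD]

lemma prefix_arr (bs : List Bool) : ∀ (t0 : Int) (pre : Array Int),
    ((bs.foldl (fun acc val =>
        let total := acc.1 + (if val then 1 else 0)
        (total, acc.2.push total)) (t0, pre)).2).toList
      = (bs.foldl (fun acc val =>
          let total := acc.1 + (if val then 1 else 0)
          (total, acc.2 ++ [total])) (t0, pre.toList)).2 := by
  induction bs with
  | nil => intro t0 pre; rfl
  | cons b bs ih =>
    intro t0 pre
    rw [List.foldl_cons, List.foldl_cons]
    show ((bs.foldl _ (t0 + (if b then 1 else 0),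
      pre.push (t0 + (if b then 1 else 0)))).2).toList = _
    rw [ih, Array.toList_push]

lemma findAllPrimes_eq (m : Int) :
    findAllPrimes m
      = (List.range (sieveA m).length).map
          (fun t => 0 + (((sieveA m).take (t + 1)).countP id : Int)) := by
  have h0 : findAllPrimes m = (((sieveAArr m).foldl
      (fun (acc : Int × Array Int) val =>
        let total := acc.1 + (if val then 1 else 0)
        (total, acc.2.push total)) ((0 : Int), (#[] : Array Int))).2).toList := rfl
  rw [h0, ← Array.foldl_toList, prefix_arr, sieveAArr_toList, Array.toList_empty]
  have h := prefix_snd (sieveA m) 0 []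
  rw [List.nil_append] at h
  exact h

lemma findAllPrimes_getD (m x : Int) (h2 : 2 ≤ x) (hxm : x ≤ m) :
    PySem.List.pyGetD (findAllPrimes m) (x - 1) 0
      = ((List.range x.toNat).countP (fun t => (sieveA m).getD t false) : Int) := by
  rw [findAllPrimes_eq, PySem.List.pyGetD_of_nonneg _ _ (by omega)]
  have hlen : (x - 1).toNat < (sieveA m).length := by rw [sieveA_length]; omega
  rw [List.getD_eq_getElem _ _ (by simpa using hlen), List.getElem_map, List.getElem_range]
  rw [zero_add]
  have hx1 : (x - 1).toNat + 1 = x.toNat := by omega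
  rw [hx1]
  congr 1
  have htake : ((sieveA m).take x.toNat).length = x.toNat := by
    rw [List.length_take, sieveA_length]; omega
  rw [countP_id_eq_range, htake]
  apply List.countP_congr
  intro t ht
  rw [List.mem_range] at ht
  have : (List.take x.toNat (sieveA m)).getD t false = (sieveA m).getD t false := by
    simp only [List.getD, List.getElem?_take]
    rw [if_pos ht]
  rw [this]

lemma countA_eq_countB (m x : Int) (h2 : 2 ≤ x) (hxm : x ≤ m) :
    (List.range x.toNat).countP (fun t => (sieveA m).getD t false)
      = (primesB m).countP (fun p => decide (p ≤ x)) := by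
  -- left side: drop index 0 (always false), reindex by k = t + 1 = 2 + t'
  rw [show x.toNat = 1 + (x.toNat - 1) by omega, List.range_add, List.countP_append]
  have hz : (List.range 1).countP (fun t => (sieveA m).getD t false) = 0 := by
    have h0 : (sieveA m).getD 0 false = false := sieveA_getD_zero m (by omega)
    rw [List.range_one, List.countP_cons, List.countP_nil, h0]
    rfl
  rw [hz, Nat.zero_add, List.countP_map]
  -- right side: filter over the explicit range, reindex by p = 2 + t'
  unfold primesB
  rw [List.countP_filter]
  rw [PySem.List.pyRange_of_pos _ _ (by norm_num : (0:Int) < 1)]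
  have hcnt : (if (2:Int) < m + 1 then ((m + 1 - 2 + 1 - 1) / 1).toNat else 0) = (m - 1).toNat := by
    rw [if_pos (by omega)]
    omega
  rw [hcnt, List.countP_map]
  rw [show (m - 1).toNat = (x.toNat - 1) + ((m - 1).toNat - (x.toNat - 1)) by omega,
    List.range_add, List.countP_append]
  have htail : List.countP
      ((fun p => decide (p ≤ x) && (sieveBArr m).getD p.toNat false) ∘ fun (k : Nat) => 2 + 1 * (k : Int))
      (List.map (fun t => x.toNat - 1 + t) (List.range ((m - 1).toNat - (x.toNat - 1)))) = 0 := by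
    rw [List.countP_eq_zero]
    intro a ha
    rw [List.mem_map] at ha
    obtain ⟨t, ht, rfl⟩ := ha
    simp only [Function.comp_apply]
    rw [decide_eq_false (by push_cast; omega : ¬ (2 + 1 * ((x.toNat - 1 + t : Nat) : Int) ≤ x))]
    simp
  rw [htail, Nat.add_zero]
  apply List.countP_congr
  intro t ht
  rw [List.mem_range] at ht
  simp only [Function.comp_apply]
  have h2k : 2 ≤ 2 + 1 * (t : Int) := by omega
  have hkx : 2 + 1 * (t : Int) ≤ x := by omega
  have hkm : 2 + 1 * (t : Int) ≤ m := by omega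
  have hA := sieveA_getD m (2 + 1 * (t : Int)) h2k hkm
  have hB := sieveB_getD m (2 + 1 * (t : Int)) h2k hkm
  have hidx : (1 + t) = (2 + 1 * (t : Int) - 1).toNat := by omega
  rw [hidx]
  rw [arrGetD_toList, sieveBArr_toList]
  rw [decide_eq_true hkx, Bool.true_and]
  rw [hA, hB]

lemma element_eq (m x : Int) (hm : 1 ≤ m) (hxm : x ≤ m) :
    (if x ≤ 1 then (0 : Int) else PySem.List.pyGetD (findAllPrimes m) (x - 1) 0)
      = countLE (primesB m) x 0 (primesB m).length := by
  rw [countLE_spec _ _ (primesB_sorted m)]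
  by_cases hx1 : x ≤ 1
  · rw [if_pos hx1]
    have h0 : (primesB m).countP (fun p => decide (p ≤ x)) = 0 := by
      rw [List.countP_eq_zero]
      intro p hp
      have := (primesB_mem m p).mp hp
      simp only [decide_eq_true_eq]
      omega
    rw [h0]
    rfl
  · rw [if_neg hx1]
    rw [findAllPrimes_getD m x (by omega) hxm, countA_eq_countB m x (by omega) hxm]
lemma foldl_some {f : Option Int → Int → Option Int}
    (hf : ∀ m x, ∃ y, f (some m) x = some y) :
    ∀ (l : List Int) (m0 : Int), ∃ m', List.foldl f (some m0) l = some m' := by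
  intro l
  induction l with
  | nil => exact fun m0 => ⟨m0, rfl⟩
  | cons b l ih =>
    intro m0
    rw [List.foldl_cons]
    obtain ⟨y, hy⟩ := hf m0 b
    rw [hy]
    exact ih y

lemma max?_some (A : List Int) (h : A ≠ []) : ∃ m, PySem.List.max? A id = some m := by
  cases A with
  | nil => exact absurd rfl h
  | cons a A =>
    unfold PySem.List.max?
    rw [List.foldl_cons]
    apply foldl_some
    intro mm x
    by_cases hlt : id mm < id x
    · exact ⟨x, by simp only [if_pos hlt]⟩
    · exact ⟨mm, by simp only [if_neg hlt]⟩

lemma fold_items (c : Int → Nat) : ∀ (ks : List Int) (acc : Int),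
    ((ks.map (fun k => (k, (c k : Int)))).foldl
      (fun acc kv => if kv.1 = 0 then acc else acc + 2 ^ kv.2.toNat - 1) acc)
    = acc + (((ks.map (fun k => (k, (c k : Int)))).filter (fun kv => !(kv.1 == 0))).map
        (fun kv => (2 : Int) ^ kv.2.toNat - 1)).sum := by
  intro ks
  induction ks with
  | nil => simp
  | cons k ks ih =>
    intro acc
    rw [List.map_cons, List.foldl_cons]
    by_cases hk : k = 0
    · rw [if_pos hk, ih]
      simp [hk]
    · rw [if_neg hk, ih]
      simp [hk]
      ring

theorem solve_eq_alt (A : List Int) (hne : A ≠ []) (hex : ∃ x ∈ A, 1 ≤ x) :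
    solve A = solve_alt A := by
  obtain ⟨m, hm⟩ := max?_some A hne
  have hmax : ∀ y ∈ A, y ≤ m := fun y hy => PySem.List.max?_isMax hm y hy
  obtain ⟨x0, hx0A, hx01⟩ := hex
  have hm1 : 1 ≤ m := le_trans hx01 (hmax x0 hx0A)
  have hfg : A.map (fun ele => if ele ≤ 1 then (0 : Int)
        else PySem.List.pyGetD (findAllPrimes m) (ele - 1) 0)
      = A.map (fun x => countLE (primesB m) x 0 (primesB m).length) :=
    List.map_congr_left (fun x hx => element_eq m x hm1 (hmax x hx))
  have hfun : (fun (d : PySem.Dict Int Int) i =>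
        if d.contains i then d.modify i 0 (· + 1) else d.insert i 1)
      = (fun (d : PySem.Dict Int Int) x => d.insert x (d.getD x 0 + 1)) := by
    funext d i
    by_cases hc : d.contains i
    · rw [if_pos hc]; rfl
    · rw [if_neg (by simpa using hc : ¬ d.contains i = true),
        PySem.Dict.getD_of_not_contains d 0 (by simpa using hc), zero_add]
  unfold solve solve_alt
  rw [hm]
  simp only [Option.getD_some]
  rw [PySem.List.foldl_append_singleton_eq_map, List.nil_append]
  rw [hfun]
  simp only [PySem.Dict.foldl_insert_getD_add_one_eq_counter, PySem.Dict.items_counter]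
  rw [fold_items, zero_add]
  rw [hfg]
  rfl

-- ===== VERDICT (by name: the statement is the Claim_ definition above) =====
theorem solve_spec : Claim_equal_solve := by
  intro A _ hpre
  exact solve_eq_alt A hpre.1 hpre.2
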